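-- pv_equiv track=rewrite | github.com/great-majority/kk-snippets | pages/ec-to-kk.py | _convert_attributes_kk_to_kks
-- ===== SOURCE A (Python) =====
-- KK_ATTRIBUTE_KEYS = [
--     "hinnyo",
--     "harapeko",
--     "donkan",
--     "choroi",
--     "bitch",
--     "mutturi",
--     "dokusyo",
--     "ongaku",
--     "kappatu",
--     "ukemi",
--     "friendly",
--     "kireizuki",
--     "taida",
--     "sinsyutu",
--     "hitori",
--     "undo",
--     "majime",
--     "likeGirls",
-- ]
--
-- KKS_ATTRIBUTE_KEYS = [
--     "harapeko",
--     "choroi",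
--     "dokusyo",
--     "ongaku",
--     "okute",
--     "friendly",
--     "kireizuki",
--     "sinsyutu",
--     "hitori",
--     "active",
--     "majime",
--     "info",
--     "love",
--     "talk",
--     "nakama",
--     "nonbiri",
--     "hinnyo",
--     "likeGirls",
--     "bitch",
--     "mutturi",
--     "lonely",
--     "ukemi",
--     "undo",
-- ]
--
-- def _convert_attributes_kk_to_kks(attributes):
--     converted = {key: False for key in KKS_ATTRIBUTE_KEYS}
--     shared_keys = set(KK_ATTRIBUTE_KEYS) & set(KKS_ATTRIBUTE_KEYS)
--     for key in shared_keys: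
--         converted[key] = bool(attributes.get(key, False))
--     converted["active"] = bool(attributes.get("kappatu", False))
--     converted["nonbiri"] = bool(attributes.get("taida", False))
--     return converted
-- ===== SOURCE B (Python) =====
-- # Table-driven rewrite: one explicit dst->src translation table, one comprehension.
-- _KKS_SOURCE = [
--     ("harapeko", "harapeko"),
--     ("choroi", "choroi"),
--     ("dokusyo", "dokusyo"),
--     ("ongaku", "ongaku"),
--     ("okute", None),
--     ("friendly", "friendly"),
--     ("kireizuki", "kireizuki"),
--     ("sinsyutu", "sinsyutu"),
--     ("hitori", "hitori"),
--     ("active", "kappatu"),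
--     ("majime", "majime"),
--     ("info", None),
--     ("love", None),
--     ("talk", None),
--     ("nakama", None),
--     ("nonbiri", "taida"),
--     ("hinnyo", "hinnyo"),
--     ("likeGirls", "likeGirls"),
--     ("bitch", "bitch"),
--     ("mutturi", "mutturi"),
--     ("lonely", None),
--     ("ukemi", "ukemi"),
--     ("undo", "undo"),
-- ]
--
-- def _convert_attributes_kk_to_kks(attributes):
--     return {dst: bool(attributes.get(src, False)) if src is not None else False
--             for dst, src in _KKS_SOURCE}
-- ===== Notes on version B (the rewrite author's own statement) =====
-- stated objective: simpler
-- what changed: Replaces A's all-False dict init + set-intersection loop + two rename patch lines with one explicit dst->src translation table and a single comprehension over it.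
import Mathlib
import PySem

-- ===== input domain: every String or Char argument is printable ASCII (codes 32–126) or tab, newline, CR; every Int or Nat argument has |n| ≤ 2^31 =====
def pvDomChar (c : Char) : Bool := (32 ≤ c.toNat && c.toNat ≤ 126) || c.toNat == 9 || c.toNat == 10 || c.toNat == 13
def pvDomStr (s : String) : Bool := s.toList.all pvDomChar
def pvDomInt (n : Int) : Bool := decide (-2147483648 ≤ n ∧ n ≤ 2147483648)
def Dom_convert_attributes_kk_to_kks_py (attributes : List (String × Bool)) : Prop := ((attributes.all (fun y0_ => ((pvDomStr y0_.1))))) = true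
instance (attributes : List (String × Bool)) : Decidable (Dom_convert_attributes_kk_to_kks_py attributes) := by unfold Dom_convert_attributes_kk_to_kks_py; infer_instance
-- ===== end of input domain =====

-- B replaces A's init-dict + set-intersection loop + two patch assignments by a single
-- table-driven comprehension over an explicit dst→src translation table (objective: simpler).

-- ===== PORT A =====
def kkAttributeKeys : List String := ["hinnyo", "harapeko", "donkan", "choroi", "bitch", "mutturi", "dokusyo", "ongaku", "kappatu", "ukemi", "friendly", "kireizuki", "taida", "sinsyutu", "hitori", "undo", "majime", "likeGirls"]

def kksAttributeKeys : List String := ["harapeko", "choroi", "dokusyo", "ongaku", "okute", "friendly", "kireizuki", "sinsyutu", "hitori", "active", "majime", "info", "love", "talk", "nakama", "nonbiri", "hinnyo", "likeGirls", "bitch", "mutturi", "lonely", "ukemi", "undo"]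

-- Python iterates `shared_keys` in hash order; each iteration overwrites a distinct key that
-- already exists in `converted`, so the result (items and their order) does not depend on that
-- iteration order. We iterate in the Set.inter order; the proof fixes the result exactly.
def convert_attributes_kk_to_kks_py (attributes : List (String × Bool)) : List (String × Bool) :=
  let d := PySem.Dict.mk attributes
  let converted : PySem.Dict String Bool :=
    kksAttributeKeys.foldl (fun c key => c.insert key false) PySem.Dict.empty
  let sharedKeys : PySem.Set String :=
    PySem.Set.inter (PySem.Set.ofList kkAttributeKeys) (PySem.Set.ofList kksAttributeKeys)
  let converted := sharedKeys.foldl (fun c key => c.insert key (d.getD key false)) converted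
  let converted := converted.insert "active" (d.getD "kappatu" false)
  let converted := converted.insert "nonbiri" (d.getD "taida" false)
  converted.items

-- ===== PORT B =====
def kksSource : List (String × Option String) := [("harapeko", some "harapeko"), ("choroi", some "choroi"), ("dokusyo", some "dokusyo"), ("ongaku", some "ongaku"), ("okute", none), ("friendly", some "friendly"), ("kireizuki", some "kireizuki"), ("sinsyutu", some "sinsyutu"), ("hitori", some "hitori"), ("active", some "kappatu"), ("majime", some "majime"), ("info", none), ("love", none), ("talk", none), ("nakama", none), ("nonbiri", some "taida"), ("hinnyo", some "hinnyo"), ("likeGirls", some "likeGirls"), ("bitch", some "bitch"), ("mutturi", some "mutturi"), ("lonely", none), ("ukemi", some "ukemi"), ("undo", some "undo")]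

def convert_attributes_kk_to_kks_py_alt (attributes : List (String × Bool)) : List (String × Bool) :=
  kksSource.map (fun p =>
    (p.1, match p.2 with
          | some src => (PySem.Dict.mk attributes).getD src false
          | none => false))

-- ===== PRECONDITION & SPEC =====
def Spec_convert_attributes_kk_to_kks_py (attributes : List (String × Bool)) (out : List (String × Bool)) : Prop := out = convert_attributes_kk_to_kks_py_alt attributes
instance (attributes : List (String × Bool)) (out : List (String × Bool)) : Decidable (Spec_convert_attributes_kk_to_kks_py attributes out) := by unfold Spec_convert_attributes_kk_to_kks_py; infer_instance

-- ===== CLAIM (what is proved, stated in full; the proofs are below) =====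
def Claim_equal_convert_attributes_kk_to_kks_py : Prop := ∀ (attributes : List (String × Bool)), Dom_convert_attributes_kk_to_kks_py attributes → Spec_convert_attributes_kk_to_kks_py attributes (convert_attributes_kk_to_kks_py attributes)

-- ===== LEMMAS AND PROOFS =====

-- ===== VERDICT (by name: the statement is the Claim_ definition above) =====
set_option maxRecDepth 10000 in
theorem convert_attributes_kk_to_kks_py_spec : Claim_equal_convert_attributes_kk_to_kks_py := by
  intro attributes _
  have hs : PySem.Set.inter (PySem.Set.ofList kkAttributeKeys) (PySem.Set.ofList kksAttributeKeys)
      = ["hinnyo", "harapeko", "choroi", "bitch", "mutturi", "dokusyo", "ongaku", "ukemi",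
         "friendly", "kireizuki", "sinsyutu", "hitori", "undo", "majime", "likeGirls"] := by decide
  have h0 : kksAttributeKeys.foldl (fun c key => c.insert key false)
        (PySem.Dict.empty (κ := String) (ν := Bool))
      = PySem.Dict.mk [("harapeko", false), ("choroi", false), ("dokusyo", false),
        ("ongaku", false), ("okute", false), ("friendly", false), ("kireizuki", false),
        ("sinsyutu", false), ("hitori", false), ("active", false), ("majime", false),
        ("info", false), ("love", false), ("talk", false), ("nakama", false),
        ("nonbiri", false), ("hinnyo", false), ("likeGirls", false), ("bitch", false),
        ("mutturi", false), ("lonely", false), ("ukemi", false), ("undo", false)] := by decide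
  unfold Spec_convert_attributes_kk_to_kks_py
  unfold convert_attributes_kk_to_kks_py convert_attributes_kk_to_kks_py_alt
  simp only [hs, h0, kksSource, List.map, List.foldl]
  simp [PySem.Dict.items_insert, PySem.Dict.contains_insert, PySem.Dict.contains_mk]
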